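-- pv_equiv track=rewrite | github.com/PavankumarDoddi/Cab-Forecasting-Model | backend/api/allocation.py | fleet_for
-- ===== SOURCE A (Python) =====
-- def fleet_for(n):
--     """
--     Given n employees, return a list of cab capacities
--     e.g. [8,8,5,3] that cover n >= sum(capacities)
--     """
--     caps = []
--     rem = n
--     for cap in (8,5,3):
--         while rem > 0 and rem >= cap:
--             caps.append(cap)
--             rem -= cap
--     if rem > 0: caps.append( rem<=3 and 3 or 5 )
--     return caps
-- ===== SOURCE B (Python) =====
-- def fleet_for(n):
--     if n <= 0:
--         return []
--     eights, rem = divmod(n, 8)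
--     fives, rem = divmod(rem, 5)
--     threes, rem = divmod(rem, 3)
--     caps = [8] * eights + [5] * fives + [3] * threes
--     if rem > 0:
--         caps.append(3)
--     return caps
-- ===== Notes on version B (the rewrite author's own statement) =====
-- stated objective: simpler
-- what changed: Replaced A's repeated-subtraction while-loops over (8,5,3) by a closed-form divmod cascade that computes each cab count directly and assembles the list by replication.
import Mathlib
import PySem

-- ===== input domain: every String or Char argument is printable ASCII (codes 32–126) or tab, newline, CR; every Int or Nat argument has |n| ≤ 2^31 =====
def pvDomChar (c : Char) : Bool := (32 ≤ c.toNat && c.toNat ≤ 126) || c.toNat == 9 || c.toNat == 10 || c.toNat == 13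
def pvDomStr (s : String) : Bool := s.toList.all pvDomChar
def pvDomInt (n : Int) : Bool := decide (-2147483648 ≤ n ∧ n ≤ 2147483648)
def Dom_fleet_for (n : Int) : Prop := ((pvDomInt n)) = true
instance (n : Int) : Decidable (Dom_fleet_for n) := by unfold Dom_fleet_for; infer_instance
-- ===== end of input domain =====

-- B replaces repeated-subtraction loops with a divmod cascade (simpler, closed-form counts).


-- ===== PORT A =====
-- while rem > 0 and rem >= cap: caps.append(cap); rem -= cap   (cap > 0 at every call, carried as h for termination)
def fleetSubLoop (cap : Int) (h : 0 < cap) (rem : Int) (caps : List Int) : List Int × Int :=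
  if 0 < rem ∧ cap ≤ rem then
    fleetSubLoop cap h (rem - cap) (caps ++ [cap])
  else (caps, rem)
termination_by rem.toNat
decreasing_by omega

def fleet_for (n : Int) : List Int :=
  let s8 := fleetSubLoop 8 (by norm_num) n []
  let s5 := fleetSubLoop 5 (by norm_num) s8.2 s8.1
  let s3 := fleetSubLoop 3 (by norm_num) s5.2 s5.1
  if 0 < s3.2 then s3.1 ++ [if s3.2 ≤ 3 then 3 else 5] else s3.1


-- ===== PORT B =====
def fleet_for_alt (n : Int) : List Int :=
  if n ≤ 0 then []
  else
    let eights := PySem.Int.floordiv n 8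
    let r1 := PySem.Int.mod n 8
    let fives := PySem.Int.floordiv r1 5
    let r2 := PySem.Int.mod r1 5
    let threes := PySem.Int.floordiv r2 3
    let r3 := PySem.Int.mod r2 3
    (List.replicate eights.toNat 8 ++ List.replicate fives.toNat 5 ++ List.replicate threes.toNat 3)
      ++ (if 0 < r3 then [3] else [])


-- ===== PRECONDITION & SPEC =====
def Spec_fleet_for (n : Int) (out : List Int) : Prop := out = fleet_for_alt n
instance (n : Int) (out : List Int) : Decidable (Spec_fleet_for n out) := by unfold Spec_fleet_for; infer_instance

-- ===== CLAIM (what is proved, stated in full; the proofs are below) =====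
def Claim_equal_fleet_for : Prop := ∀ (n : Int), Dom_fleet_for n → Spec_fleet_for n (fleet_for n)

-- ===== LEMMAS AND PROOFS =====

theorem fleetSubLoop_nonpos (cap : Int) (h : 0 < cap) (rem : Int) (hr : rem ≤ 0) (caps : List Int) :
    fleetSubLoop cap h rem caps = (caps, rem) := by
  rw [fleetSubLoop, if_neg (by omega)]

theorem fleetSubLoop_eq (cap : Int) (h : 0 < cap) (rem : Int) (hr : 0 ≤ rem) (caps : List Int) :
    fleetSubLoop cap h rem caps = (caps ++ List.replicate (rem / cap).toNat cap, rem % cap) := by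
  fun_induction fleetSubLoop cap h rem caps with
  | case1 rem caps hg ih =>
      rw [ih (by omega)]
      have h1 : (rem - cap) / cap = rem / cap - 1 := by
        rw [sub_eq_add_neg, ← neg_one_mul, Int.add_mul_ediv_right _ _ (show cap ≠ 0 by omega)]
        ring
      have h2 : (rem - cap) % cap = rem % cap := Int.sub_emod_right rem cap
      have hq : 0 < rem / cap := by
        have hd := Int.ediv_le_ediv h hg.2
        rw [Int.ediv_self (by omega)] at hd
        omega
      have h3 : ((rem - cap) / cap).toNat + 1 = (rem / cap).toNat := by omega
      rw [h2, ← h3, List.replicate_succ]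
      simp
  | case2 rem caps hg =>
      have hd0 : rem / cap = 0 := Int.ediv_eq_zero_of_lt hr (by omega)
      have hm0 : rem % cap = rem := Int.emod_eq_of_lt hr (by omega)
      simp [hd0, hm0]

-- ===== VERDICT (by name: the statement is the Claim_ definition above) =====
theorem fleet_for_spec : Claim_equal_fleet_for := by
  unfold Claim_equal_fleet_for Spec_fleet_for
  intro n _
  by_cases hn : n ≤ 0
  · unfold fleet_for fleet_for_alt
    simp [fleetSubLoop_nonpos, hn, show ¬ (0 : Int) < n by omega]
  · unfold fleet_for fleet_for_alt
    rw [fleetSubLoop_eq 8 (by norm_num) n (by omega)]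
    simp only
    rw [fleetSubLoop_eq 5 (by norm_num) (n % 8) (Int.emod_nonneg n (by norm_num))]
    simp only
    rw [fleetSubLoop_eq 3 (by norm_num) (n % 8 % 5) (Int.emod_nonneg _ (by norm_num))]
    simp only
    rw [if_neg hn]
    have e8d : PySem.Int.floordiv n 8 = n / 8 := PySem.Int.floordiv_eq_ediv_of_pos (by norm_num)
    have e8m : PySem.Int.mod n 8 = n % 8 := PySem.Int.mod_eq_emod_of_pos (by norm_num)
    have e5d : PySem.Int.floordiv (n % 8) 5 = n % 8 / 5 := PySem.Int.floordiv_eq_ediv_of_pos (by norm_num)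
    have e5m : PySem.Int.mod (n % 8) 5 = n % 8 % 5 := PySem.Int.mod_eq_emod_of_pos (by norm_num)
    have e3d : PySem.Int.floordiv (n % 8 % 5) 3 = n % 8 % 5 / 3 := PySem.Int.floordiv_eq_ediv_of_pos (by norm_num)
    have e3m : PySem.Int.mod (n % 8 % 5) 3 = n % 8 % 5 % 3 := PySem.Int.mod_eq_emod_of_pos (by norm_num)
    simp only [e8d, e8m, e5d, e5m, e3d, e3m]
    by_cases hr : 0 < n % 8 % 5 % 3
    · rw [if_pos hr, if_pos (show n % 8 % 5 % 3 ≤ 3 by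
        have := Int.emod_lt_of_pos (n % 8 % 5) (show (0:Int) < 3 by norm_num); omega),
        if_pos hr]
      simp
    · rw [if_neg hr, if_neg hr]
      simp
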